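-- pv_equiv track=rewrite | github.com/Leochuanxing/Paritope_Epitope | FrameConstraint.py | Core_selection
-- ===== SOURCE A (Python) =====
-- import copy
--
-- def Core_selection(matched_up_indices_list, core_number_per_chain, core_separation):
--     # Creat an empty container
--     selected_cores = []
--     # Sort the list according to the contact numbers
--     matched_up_indices_list.sort(key = lambda x:x[2], reverse = True)
--     # Make a deep copy
--     value = copy.deepcopy(matched_up_indices_list)
--     # Select
--     while value!= [] and len(selected_cores) < core_number_per_chain:
--         selected_cores.append(value[0])
--         to_be_removed =[]
--         for match in value:
--             Ab_pos_start = min(match[0])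
--             Ab_pos_end = max(match[0])
--             selected_Ab_pos_start = min(selected_cores[-1][0])
--             selected_Ab_pos_end = max(selected_cores[-1][0])
-- #            selected_Ab_pos.sort()
--             # make sure the distance between the selected Ab pos and the Ab pos in the value
--             # are separated by at least core_separation number of amino acids
--             if abs(Ab_pos_start-selected_Ab_pos_end)<= core_separation or \
--             abs(Ab_pos_end - selected_Ab_pos_start) <= core_separation or \
--             abs(Ab_pos_start - selected_Ab_pos_start) <= core_separation or\
--             abs(Ab_pos_end - selected_Ab_pos_end) <= core_separation:
--                 to_be_removed.append(match)
--         for i in to_be_removed: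
--             value.remove(i)
--     return selected_cores
-- ===== SOURCE B (Python) =====
-- import copy
--
-- def _span(m):
--     return (min(m[0]), max(m[0]))
--
-- def _near(a, b, sep):
--     return any(abs(d) <= sep for d in (a[0] - b[1], a[1] - b[0], a[0] - b[0], a[1] - b[1]))
--
-- def Core_selection(matched_up_indices_list, core_number_per_chain, core_separation):
--     # Same in-place sort as A; then a single forward pass over the deepcopy,
--     # carrying the chosen cores together with their precomputed (min, max) spans.
--     matched_up_indices_list.sort(key=lambda x: x[2], reverse=True)
--     chosen = []  # list of (span, match)
--     for m in copy.deepcopy(matched_up_indices_list):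
--         if len(chosen) >= core_number_per_chain:
--             break
--         s = _span(m)
--         if all(not _near(s, b, core_separation) for b, _ in chosen):
--             chosen.append((s, m))
--     return [m for _, m in chosen]
-- ===== Notes on version B (the rewrite author's own statement) =====
-- stated objective: simpler
-- what changed: A repeatedly mutates a working copy (append head, collect a to_be_removed list, call list.remove per element) inside a while loop; B makes one forward pass over the sorted copy, carrying each chosen core together with its precomputed (min,max) span and keeping a candidate iff its span is far from every chosen span, with no removal lists and no repeated list.remove scans, and recomputing no min/max for already chosen cores.
-- outside the precondition, e.g. on Core_selection([([1], [2], 3)], 2, -1): A returns [([1], [2], 3), ([1], [2], 3)], B returns [([1], [2], 3)]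
import Mathlib
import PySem

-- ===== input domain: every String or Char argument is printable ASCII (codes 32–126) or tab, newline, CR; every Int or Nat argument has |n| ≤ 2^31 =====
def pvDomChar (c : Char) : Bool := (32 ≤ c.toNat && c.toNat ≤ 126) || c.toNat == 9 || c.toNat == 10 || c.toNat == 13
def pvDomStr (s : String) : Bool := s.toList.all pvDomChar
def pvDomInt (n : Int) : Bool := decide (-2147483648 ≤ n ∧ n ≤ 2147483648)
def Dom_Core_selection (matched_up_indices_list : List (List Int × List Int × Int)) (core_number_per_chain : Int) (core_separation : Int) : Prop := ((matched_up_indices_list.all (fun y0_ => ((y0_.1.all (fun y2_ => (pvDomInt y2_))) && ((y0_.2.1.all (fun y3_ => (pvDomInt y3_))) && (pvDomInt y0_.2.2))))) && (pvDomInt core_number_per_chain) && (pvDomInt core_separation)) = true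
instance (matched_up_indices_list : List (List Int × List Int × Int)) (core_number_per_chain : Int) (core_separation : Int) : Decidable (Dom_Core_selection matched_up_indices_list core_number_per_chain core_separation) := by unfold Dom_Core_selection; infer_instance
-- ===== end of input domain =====

-- B replaces A's repeated remove-from-working-copy rounds by one forward pass over the
-- sorted list, carrying each chosen core with its precomputed (min,max) span (objective:
-- simpler). Both Pythons sort the argument in place; equivalence is about the return value.

-- ===== PORT A =====
-- min(match[0]) / max(match[0]); Pre_ excludes the inputs where Python would raise
-- ValueError on an empty match[0], so the .getD 0 default is never the claimed value.
def pvAStart (m : List Int × List Int × Int) : Int := (PySem.List.min? m.1 (fun y => y)).getD 0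
def pvAEnd (m : List Int × List Int × Int) : Int := (PySem.List.max? m.1 (fun y => y)).getD 0

-- the four-way spacing test of A's inner `if`, candidate `match` against selected_cores[-1]
def pvAConf (sep : Int) (m c : List Int × List Int × Int) : Bool :=
  decide (|pvAStart m - pvAEnd c| ≤ sep) || decide (|pvAEnd m - pvAStart c| ≤ sep) ||
  decide (|pvAStart m - pvAStart c| ≤ sep) || decide (|pvAEnd m - pvAEnd c| ≤ sep)

-- the while loop: append value[0], collect to_be_removed, remove each from value
def pvALoop (k sep : Int) (value selected : List (List Int × List Int × Int)) :
    List (List Int × List Int × Int) :=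
  match value with
  | [] => selected
  | v0 :: _ =>
    if h : (selected.length : Int) < k then
      let selected' := selected ++ [v0]
      let to_be_removed := value.filter (fun m => pvAConf sep m v0)
      let value' := to_be_removed.foldl (fun v i => (PySem.List.remove? v i).getD v) value
      pvALoop k sep value' selected'
    else selected
  termination_by (k - selected.length).toNat
  decreasing_by simp only [List.length_append, List.length_cons, List.length_nil]; omega

def Core_selection (matched_up_indices_list : List (List Int × List Int × Int)) (core_number_per_chain : Int) (core_separation : Int) : List (List Int × List Int × Int) :=
  pvALoop core_number_per_chain core_separation
    (PySem.List.sorted matched_up_indices_list (fun x => x.2.2) true) []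

-- ===== PORT B =====
-- _span(m) = (min(m[0]), max(m[0]))
def pvSpan (m : List Int × List Int × Int) : Int × Int :=
  ((PySem.List.min? m.1 (fun y => y)).getD 0, (PySem.List.max? m.1 (fun y => y)).getD 0)

-- _near(a, b, sep): any of the four endpoint differences within sep
def pvNear (a b : Int × Int) (sep : Int) : Bool :=
  [a.1 - b.2, a.2 - b.1, a.1 - b.1, a.2 - b.2].any (fun d => decide (|d| ≤ sep))

-- the for loop of B: chosen carries (span, match) pairs; break once full
def pvBPass (k sep : Int) : List (List Int × List Int × Int) →
    List ((Int × Int) × (List Int × List Int × Int)) →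
    List ((Int × Int) × (List Int × List Int × Int))
  | [], chosen => chosen
  | m :: rest, chosen =>
    if k ≤ (chosen.length : Int) then chosen
    else if chosen.all (fun c => !pvNear (pvSpan m) c.1 sep) then
      pvBPass k sep rest (chosen ++ [(pvSpan m, m)])
    else pvBPass k sep rest chosen

def Core_selection_alt (matched_up_indices_list : List (List Int × List Int × Int)) (core_number_per_chain : Int) (core_separation : Int) : List (List Int × List Int × Int) :=
  (pvBPass core_number_per_chain core_separation
    (PySem.List.sorted matched_up_indices_list (fun x => x.2.2) true) []).map (fun p => p.2)

-- ===== PRECONDITION & SPEC =====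
-- Pre_ excludes (a) inputs where A raises ValueError (some match[0] empty while the loop
-- runs, i.e. core_number_per_chain > 0 and such an element is present), and (b) negative
-- core_separation when more than one core is requested from a nonempty list, outside the
-- natural domain of a separation distance: there nothing conflicts with itself, so A
-- re-appends the single top core core_number_per_chain times.
def Pre_Core_selection (matched_up_indices_list : List (List Int × List Int × Int)) (core_number_per_chain : Int) (core_separation : Int) : Prop :=
  (0 ≤ core_separation ∨ core_number_per_chain ≤ 1 ∨ matched_up_indices_list = []) ∧
  (core_number_per_chain ≤ 0 ∨ ∀ m ∈ matched_up_indices_list, m.1 ≠ [])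
instance (matched_up_indices_list : List (List Int × List Int × Int)) (core_number_per_chain : Int) (core_separation : Int) : Decidable (Pre_Core_selection matched_up_indices_list core_number_per_chain core_separation) := by unfold Pre_Core_selection; infer_instance

def pvWitness_Core_selection : (List (List Int × List Int × Int)) × Int × Int :=
  ([([1, 2], [5], 4), ([20], [6], 3)], 2, 3)

def Spec_Core_selection (matched_up_indices_list : List (List Int × List Int × Int)) (core_number_per_chain : Int) (core_separation : Int) (out : List (List Int × List Int × Int)) : Prop := out = Core_selection_alt matched_up_indices_list core_number_per_chain core_separation
instance (matched_up_indices_list : List (List Int × List Int × Int)) (core_number_per_chain : Int) (core_separation : Int) (out : List (List Int × List Int × Int)) : Decidable (Spec_Core_selection matched_up_indices_list core_number_per_chain core_separation out) := by unfold Spec_Core_selection; infer_instance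

-- ===== CLAIM =====
def Claim_equal_Core_selection : Prop := ∀ (matched_up_indices_list : List (List Int × List Int × Int)) (core_number_per_chain : Int) (core_separation : Int), Dom_Core_selection matched_up_indices_list core_number_per_chain core_separation → Pre_Core_selection matched_up_indices_list core_number_per_chain core_separation → Spec_Core_selection matched_up_indices_list core_number_per_chain core_separation (Core_selection matched_up_indices_list core_number_per_chain core_separation)

-- ===== LEMMAS AND PROOFS =====

-- proof-only middle form: B's pass phrased directly on the un-annotated selected list
def pvMid (k sep : Int) : List (List Int × List Int × Int) →
    List (List Int × List Int × Int) → List (List Int × List Int × Int)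
  | [], S => S
  | m :: rest, S =>
    if k ≤ (S.length : Int) then S
    else if S.all (fun c => !pvAConf sep m c) then pvMid k sep rest (S ++ [m])
    else pvMid k sep rest S

theorem pvNear_eq_conf (sep : Int) (m c : List Int × List Int × Int) :
    pvNear (pvSpan m) (pvSpan c) sep = pvAConf sep m c := by
  simp only [pvNear, pvSpan, pvAConf, pvAStart, pvAEnd, List.any_cons, List.any_nil,
    Bool.or_false]
  simp only [Bool.or_assoc]
  rfl


theorem pvAConf_self (sep : Int) (hsep : 0 ≤ sep) (m : List Int × List Int × Int) :
    pvAConf sep m m = true := by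
  simp only [pvAConf, Bool.or_eq_true, decide_eq_true_eq, sub_self, abs_zero]
  tauto

-- B's annotated pass projected back: pvBPass over a mapped accumulator is pvMid mapped
theorem pvBPass_map (k sep : Int) :
    ∀ (V S : List (List Int × List Int × Int)),
      pvBPass k sep V (S.map (fun m => (pvSpan m, m)))
        = (pvMid k sep V S).map (fun m => (pvSpan m, m)) := by
  intro V
  induction V with
  | nil => intro S; rfl
  | cons m rest ih =>
    intro S
    rw [pvBPass, pvMid]
    have hlen : (((S.map (fun m => (pvSpan m, m))).length : Nat) : Int) = (S.length : Int) := by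
      simp
    have hall : (S.map (fun m => (pvSpan m, m))).all (fun c => !pvNear (pvSpan m) c.1 sep)
        = S.all (fun c => !pvAConf sep m c) := by
      simp only [List.all_map, Function.comp_def, pvNear_eq_conf]
    rw [hlen, hall]
    by_cases hfull : k ≤ (S.length : Int)
    · simp [hfull]
    · simp only [hfull, if_false]
      by_cases hok : S.all (fun c => !pvAConf sep m c) = true
      · simp only [hok, if_true]
        have : S.map (fun m => (pvSpan m, m)) ++ [(pvSpan m, m)]
            = (S ++ [m]).map (fun m => (pvSpan m, m)) := by simp
        rw [this, ih]
      · simp only [Bool.not_eq_true] at hok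
        simp only [hok, Bool.false_eq_true, if_false, ih]

-- removing every element of value.filter p (first occurrence each) from value
-- yields value.filter (not p)
theorem pvFoldlRemove_cons_ne (x : List Int × List Int × Int)
    (L : List (List Int × List Int × Int)) :
    ∀ V, (∀ i ∈ L, i ≠ x) →
      L.foldl (fun v i => (PySem.List.remove? v i).getD v) (x :: V)
        = x :: L.foldl (fun v i => (PySem.List.remove? v i).getD v) V := by
  induction L with
  | nil => intro V _; rfl
  | cons i L ih =>
    intro V hne
    have hix : i ≠ x := hne i (by simp)
    have hstep : (PySem.List.remove? (x :: V) i).getD (x :: V)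
        = x :: (PySem.List.remove? V i).getD V := by
      rw [PySem.List.remove?_cons_of_ne V (Ne.symm hix)]
      cases PySem.List.remove? V i <;> rfl
    simp only [List.foldl_cons, hstep]
    exact ih _ (fun j hj => hne j (by simp [hj]))

theorem pvFoldlRemove_filter (p : (List Int × List Int × Int) → Bool) :
    ∀ V : List (List Int × List Int × Int),
      (V.filter p).foldl (fun v i => (PySem.List.remove? v i).getD v) V
        = V.filter (fun x => !p x) := by
  intro V
  induction V with
  | nil => rfl
  | cons x V ih =>
    by_cases hx : p x = true
    · have h1 : (x :: V).filter p = x :: V.filter p := by simp [hx]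
      have h2 : (PySem.List.remove? (x :: V) x).getD (x :: V) = V := by
        simp [PySem.List.remove?_cons_self]
      rw [h1]
      simp only [List.foldl_cons, h2, ih]
      simp [hx]
    · have hx' : p x = false := by simpa using hx
      have h1 : (x :: V).filter p = V.filter p := by simp [hx']
      rw [h1, pvFoldlRemove_cons_ne x (V.filter p) V
        (fun i hi => by
          have : p i = true := (List.mem_filter.mp hi).2
          intro h; rw [h] at this; simp [hx'] at this), ih]
      simp [hx']

theorem pvMid_of_full (k sep : Int) (V S : List (List Int × List Int × Int))
    (h : k ≤ (S.length : Int)) : pvMid k sep V S = S := by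
  cases V with
  | nil => rfl
  | cons m rest => rw [pvMid]; simp [h]

-- pvMid ignores candidates that conflict with a core already selected
theorem pvMid_filter (k sep : Int) (v0 : List Int × List Int × Int) :
    ∀ (V S : List (List Int × List Int × Int)), v0 ∈ S →
      pvMid k sep (V.filter (fun m => !pvAConf sep m v0)) S = pvMid k sep V S := by
  intro V
  induction V with
  | nil => intro S _; rfl
  | cons x V ih =>
    intro S hv0
    by_cases hfull : k ≤ (S.length : Int)
    · rw [pvMid_of_full _ _ _ _ hfull, pvMid_of_full _ _ _ _ hfull]
    · by_cases hc : pvAConf sep x v0 = true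
      · have h1 : (x :: V).filter (fun m => !pvAConf sep m v0)
            = V.filter (fun m => !pvAConf sep m v0) := by simp [hc]
        have hall : S.all (fun c => !pvAConf sep x c) = false := by
          simp only [List.all_eq_false]
          exact ⟨v0, hv0, by simp [hc]⟩
        rw [h1, ih S hv0]
        conv_rhs => rw [pvMid]
        simp [hfull, hall]
      · have hc' : pvAConf sep x v0 = false := by simpa using hc
        have h1 : (x :: V).filter (fun m => !pvAConf sep m v0)
            = x :: V.filter (fun m => !pvAConf sep m v0) := by simp [hc']
        rw [h1, pvMid, pvMid]
        simp only [hfull, if_false]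
        by_cases hall : S.all (fun c => !pvAConf sep x c) = true
        · simp only [hall, if_true]
          exact ih (S ++ [x]) (by simp [hv0])
        · simp only [Bool.not_eq_true] at hall
          simp only [hall, Bool.false_eq_true, if_false]
          exact ih S hv0

-- the main invariant: once the working list contains no element conflicting with a
-- selected core, A's remove-rounds and B's single pass coincide
theorem pvLoop_eq (k sep : Int) (hsep : 0 ≤ sep) :
    ∀ (n : Nat) (V S : List (List Int × List Int × Int)),
      (k - S.length).toNat = n →
      (∀ m ∈ V, ∀ c ∈ S, pvAConf sep m c = false) →
      pvALoop k sep V S = pvMid k sep V S := by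
  intro n
  induction n using Nat.strong_induction_on with
  | _ n ih =>
    intro V S hn H
    cases V with
    | nil => rw [pvALoop]; rw [pvMid]
    | cons v0 rest =>
      by_cases hk : (S.length : Int) < k
      · rw [pvALoop]
        simp only [hk, dif_pos]
        rw [pvFoldlRemove_filter (fun m => pvAConf sep m v0) (v0 :: rest)]
        have hself : pvAConf sep v0 v0 = true := pvAConf_self sep hsep v0
        have hV' : (v0 :: rest).filter (fun x => !pvAConf sep x v0)
            = rest.filter (fun x => !pvAConf sep x v0) := by simp [hself]
        rw [hV']
        have hH' : ∀ m ∈ rest.filter (fun x => !pvAConf sep x v0),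
            ∀ c ∈ S ++ [v0], pvAConf sep m c = false := by
          intro m hm c hc
          rcases List.mem_filter.mp hm with ⟨hmr, hmf⟩
          rcases List.mem_append.mp hc with hcS | hcv
          · exact H m (by simp [hmr]) c hcS
          · have : c = v0 := by simpa using hcv
            subst this; simpa using hmf
        have hmeas : (k - ((S ++ [v0]).length : Int)).toNat < n := by
          simp only [List.length_append, List.length_cons, List.length_nil] at *
          omega
        rw [ih _ hmeas _ _ rfl hH']
        rw [pvMid_filter k sep v0 rest (S ++ [v0]) (by simp)]
        conv_rhs => rw [pvMid]
        have hall : S.all (fun c => !pvAConf sep v0 c) = true := by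
          simp only [List.all_eq_true]
          intro c hc
          simp [H v0 (by simp) c hc]
        simp [not_le.mpr hk, hall]
      · rw [pvALoop, pvMid]
        simp [hk, not_lt.mp hk]

theorem pvALoop_of_full (k sep : Int) (V S : List (List Int × List Int × Int))
    (h : k ≤ (S.length : Int)) : pvALoop k sep V S = S := by
  cases V with
  | nil => rw [pvALoop]
  | cons v0 rest => rw [pvALoop]; simp [not_lt.mpr h]

-- with at most one core requested, A's rounds and B's pass trivially coincide
theorem pvLoop_eq_k1 (k sep : Int) (hk : k ≤ 1) :
    ∀ V : List (List Int × List Int × Int), pvALoop k sep V [] = pvMid k sep V [] := by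
  intro V
  cases V with
  | nil => rw [pvALoop, pvMid]
  | cons v0 rest =>
    by_cases h0 : k ≤ 0
    · rw [pvALoop, pvMid]
      simp [h0, not_lt.mpr (by simpa using h0)]
    · rw [pvALoop, pvMid]
      simp only [List.length_nil, Nat.cast_zero, List.nil_append, List.all_nil, if_true]
      rw [dif_pos (by omega : (0:Int) < k), if_neg h0,
        pvALoop_of_full k sep _ [v0] (by simp; omega),
        pvMid_of_full k sep rest [v0] (by simp; omega)]

-- ===== VERDICT (by name: the statement is the Claim_ definition above) =====
theorem Core_selection_spec : Claim_equal_Core_selection := by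
  intro lst k sep _ hpre
  unfold Spec_Core_selection Core_selection Core_selection_alt
  have hB : (pvBPass k sep (PySem.List.sorted lst (fun x => x.2.2) true) []).map
      (fun p => p.2) = pvMid k sep (PySem.List.sorted lst (fun x => x.2.2) true) [] := by
    have h := pvBPass_map k sep (PySem.List.sorted lst (fun x => x.2.2) true) []
    simp only [List.map_nil] at h
    have hcomp : ∀ L : List (List Int × List Int × Int),
        (L.map (fun m => (pvSpan m, m))).map (fun p => p.2) = L := by
      intro L
      induction L with
      | nil => rfl
      | cons a t ih => simp [ih]
    rw [h, hcomp]
  rw [hB]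
  rcases hpre.1 with hsep | hk1 | hnil
  · exact pvLoop_eq k sep hsep _ _ [] rfl (by intro m _ c hc; simp at hc)
  · exact pvLoop_eq_k1 k sep hk1 _
  · subst hnil
    rw [(PySem.List.sorted_eq_nil_iff _ _ _).mpr rfl, pvALoop, pvMid]
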